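-- pv_equiv track=rewrite | github.com/rominapy/cs125-book-search | src/ingest/kaggle_books.py | _extract_fields
-- ===== SOURCE A (Python) =====
-- _DEFAULT_CANDIDATES = {
--     "id": [
--         "id",
--         "book_id",
--         "bookid",
--         "isbn13",
--         "isbn_13",
--         "isbn10",
--         "isbn_10",
--     ],
--     "title": ["title", "book_title", "name"],
--     "subtitle": ["subtitle", "sub_title"],
--     "title_and_subtitle": ["title_and_subtitle"],
--     "authors": ["authors", "author", "author_name"],
--     "description": ["description", "book_description", "summary", "tagged_description"],
--     "categories": [
--         "categories",
--         "category",
--         "subjects",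
--         "subject",
--         "genres",
--         "simple_categories",
--     ],
--     "language": ["language", "language_code", "lang"],
--     "published_year": ["published_year", "publication_year", "year"],
--     "average_rating": ["average_rating", "avg_rating", "rating"],
--     "ratings_count": ["ratings_count", "num_ratings", "ratings"],
--     "num_pages": ["num_pages", "page_count", "pages"],
--     "thumbnail": ["thumbnail", "image_url", "cover_image", "cover_url"],
-- }
--
-- def _extract_fields(row: dict[str, str]) -> dict[str, str]:
--     normalized = {key.strip().lower(): value for key, value in row.items()}
--
--     def pick(field: str) -> str:
--         for candidate in _DEFAULT_CANDIDATES[field]: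
--             if candidate in normalized and normalized[candidate]:
--                 return normalized[candidate]
--         return ""
--
--     return {key: pick(key) for key in _DEFAULT_CANDIDATES}
-- ===== SOURCE B (Python) =====
-- # Field order of the output (the keys of the module's _DEFAULT_CANDIDATES).
-- _FIELDS = [
--     "id", "title", "subtitle", "title_and_subtitle", "authors", "description",
--     "categories", "language", "published_year", "average_rating",
--     "ratings_count", "num_pages", "thumbnail",
-- ]
--
-- # Reverse priority table: candidate key -> (field, rank); smaller rank = higher priority.
-- _PRIORITY = {
--     "id": ("id", 0), "book_id": ("id", 1), "bookid": ("id", 2), "isbn13": ("id", 3),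
--     "isbn_13": ("id", 4), "isbn10": ("id", 5), "isbn_10": ("id", 6),
--     "title": ("title", 0), "book_title": ("title", 1), "name": ("title", 2),
--     "subtitle": ("subtitle", 0), "sub_title": ("subtitle", 1),
--     "title_and_subtitle": ("title_and_subtitle", 0),
--     "authors": ("authors", 0), "author": ("authors", 1), "author_name": ("authors", 2),
--     "description": ("description", 0), "book_description": ("description", 1),
--     "summary": ("description", 2), "tagged_description": ("description", 3),
--     "categories": ("categories", 0), "category": ("categories", 1),
--     "subjects": ("categories", 2), "subject": ("categories", 3),
--     "genres": ("categories", 4), "simple_categories": ("categories", 5),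
--     "language": ("language", 0), "language_code": ("language", 1), "lang": ("language", 2),
--     "published_year": ("published_year", 0), "publication_year": ("published_year", 1),
--     "year": ("published_year", 2),
--     "average_rating": ("average_rating", 0), "avg_rating": ("average_rating", 1),
--     "rating": ("average_rating", 2),
--     "ratings_count": ("ratings_count", 0), "num_ratings": ("ratings_count", 1),
--     "ratings": ("ratings_count", 2),
--     "num_pages": ("num_pages", 0), "page_count": ("num_pages", 1), "pages": ("num_pages", 2),
--     "thumbnail": ("thumbnail", 0), "image_url": ("thumbnail", 1),
--     "cover_image": ("thumbnail", 2), "cover_url": ("thumbnail", 3),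
-- }
--
--
-- def _extract_fields(row: dict[str, str]) -> dict[str, str]:
--     # Single reverse pass over the row: the first time a normalized key is seen
--     # (= its last write) decides its value; keep the lowest-rank truthy hit per field.
--     best = {}
--     seen = set()
--     for raw_key, value in reversed(list(row.items())):
--         key = raw_key.strip().lower()
--         if key in seen:
--             continue
--         seen.add(key)
--         if not value:
--             continue
--         hit = _PRIORITY.get(key)
--         if hit is None:
--             continue
--         field, rank = hit
--         if field not in best or rank < best[field][0]:
--             best[field] = (rank, value)
--     return {field: best[field][1] if field in best else "" for field in _FIELDS}
-- ===== Notes on version B (the rewrite author's own statement) =====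
-- stated objective: alternative
-- what changed: A builds a normalized dict and then scans each field's candidate list with an early-return pick(); B never builds the normalized dict: it makes one reverse pass over the row with a seen-set (so the first hit of a normalized key is its last write) and a literal reverse priority table candidate->(field, rank), keeping the lowest-rank truthy hit per field.
import Mathlib
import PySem

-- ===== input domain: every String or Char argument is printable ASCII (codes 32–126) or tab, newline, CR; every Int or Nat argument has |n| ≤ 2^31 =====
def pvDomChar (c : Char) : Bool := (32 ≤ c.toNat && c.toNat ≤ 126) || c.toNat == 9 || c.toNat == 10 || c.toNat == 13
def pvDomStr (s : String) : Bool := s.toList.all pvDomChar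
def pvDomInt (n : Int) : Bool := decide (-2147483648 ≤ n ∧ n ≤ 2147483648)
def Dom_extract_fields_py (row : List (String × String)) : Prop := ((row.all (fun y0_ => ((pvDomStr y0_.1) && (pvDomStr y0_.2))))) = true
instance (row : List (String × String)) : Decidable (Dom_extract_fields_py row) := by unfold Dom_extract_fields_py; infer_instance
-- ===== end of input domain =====

-- B avoids A's normalized dict and per-field candidate scans: one reverse pass over the row with a
-- seen-set plus a literal reverse priority table (objective: alternative decomposition, same result).

-- ===== PORT A =====
-- _DEFAULT_CANDIDATES as an insertion-ordered association list (module constant of A)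
def pvCANDS : List (String × List String) :=
  [("id", ["id", "book_id", "bookid", "isbn13", "isbn_13", "isbn10", "isbn_10"]),
   ("title", ["title", "book_title", "name"]),
   ("subtitle", ["subtitle", "sub_title"]),
   ("title_and_subtitle", ["title_and_subtitle"]),
   ("authors", ["authors", "author", "author_name"]),
   ("description", ["description", "book_description", "summary", "tagged_description"]),
   ("categories", ["categories", "category", "subjects", "subject", "genres", "simple_categories"]),
   ("language", ["language", "language_code", "lang"]),
   ("published_year", ["published_year", "publication_year", "year"]),
   ("average_rating", ["average_rating", "avg_rating", "rating"]),
   ("ratings_count", ["ratings_count", "num_ratings", "ratings"]),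
   ("num_pages", ["num_pages", "page_count", "pages"]),
   ("thumbnail", ["thumbnail", "image_url", "cover_image", "cover_url"])]

-- normalized = {key.strip().lower(): value for key, value in row.items()}
def pvNormalize (row : List (String × String)) : PySem.Dict String String :=
  row.foldl (fun d kv => d.insert (PySem.Str.lower (PySem.Str.strip kv.1)) kv.2) PySem.Dict.empty

-- def pick(field): for candidate in _DEFAULT_CANDIDATES[field]:
--   if candidate in normalized and normalized[candidate]: return normalized[candidate]; return ""
def pvPick (d : PySem.Dict String String) : List String → String
  | [] => ""
  | c :: rest =>
    match d.get? c with
    | some v => if v ≠ "" then v else pvPick d rest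
    | none => pvPick d rest

def extract_fields_py (row : List (String × String)) : List (String × String) :=
  let normalized := pvNormalize row
  (pvCANDS.foldl (fun d p => d.insert p.1 (pvPick normalized p.2)) PySem.Dict.empty).items

-- ===== PORT B =====
-- _FIELDS: output field order
def pvFIELDS : List String :=
  ["id", "title", "subtitle", "title_and_subtitle", "authors", "description",
   "categories", "language", "published_year", "average_rating",
   "ratings_count", "num_pages", "thumbnail"]

-- _PRIORITY: candidate key -> (field, rank), a literal dict
def pvPRIORITY : PySem.Dict String (String × Int) :=
  PySem.Dict.ofList
    [("id", ("id", 0)), ("book_id", ("id", 1)), ("bookid", ("id", 2)), ("isbn13", ("id", 3)),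
     ("isbn_13", ("id", 4)), ("isbn10", ("id", 5)), ("isbn_10", ("id", 6)),
     ("title", ("title", 0)), ("book_title", ("title", 1)), ("name", ("title", 2)),
     ("subtitle", ("subtitle", 0)), ("sub_title", ("subtitle", 1)),
     ("title_and_subtitle", ("title_and_subtitle", 0)),
     ("authors", ("authors", 0)), ("author", ("authors", 1)), ("author_name", ("authors", 2)),
     ("description", ("description", 0)), ("book_description", ("description", 1)),
     ("summary", ("description", 2)), ("tagged_description", ("description", 3)),
     ("categories", ("categories", 0)), ("category", ("categories", 1)),
     ("subjects", ("categories", 2)), ("subject", ("categories", 3)),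
     ("genres", ("categories", 4)), ("simple_categories", ("categories", 5)),
     ("language", ("language", 0)), ("language_code", ("language", 1)), ("lang", ("language", 2)),
     ("published_year", ("published_year", 0)), ("publication_year", ("published_year", 1)),
     ("year", ("published_year", 2)),
     ("average_rating", ("average_rating", 0)), ("avg_rating", ("average_rating", 1)),
     ("rating", ("average_rating", 2)),
     ("ratings_count", ("ratings_count", 0)), ("num_ratings", ("ratings_count", 1)),
     ("ratings", ("ratings_count", 2)),
     ("num_pages", ("num_pages", 0)), ("page_count", ("num_pages", 1)), ("pages", ("num_pages", 2)),
     ("thumbnail", ("thumbnail", 0)), ("image_url", ("thumbnail", 1)),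
     ("cover_image", ("thumbnail", 2)), ("cover_url", ("thumbnail", 3))]

-- the 'for raw_key, value in reversed(list(row.items())):' loop body over the state (seen, best)
def pvBStep (st : PySem.Set String × PySem.Dict String (Int × String)) (kv : String × String) :
    PySem.Set String × PySem.Dict String (Int × String) :=
  let key := PySem.Str.lower (PySem.Str.strip kv.1)
  if st.1.contains key then st
  else
    let seen' := st.1.add key
    if kv.2 = "" then (seen', st.2)
    else
      match pvPRIORITY.get? key with
      | none => (seen', st.2)
      | some (field, rank) =>
        match st.2.get? field with
        | none => (seen', st.2.insert field (rank, kv.2))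
        | some (j, _) =>
          if rank < j then (seen', st.2.insert field (rank, kv.2)) else (seen', st.2)

def extract_fields_py_alt (row : List (String × String)) : List (String × String) :=
  let st := row.reverse.foldl pvBStep (PySem.Set.empty, PySem.Dict.empty)
  pvFIELDS.map (fun field => (field, match st.2.get? field with | some p => p.2 | none => ""))

-- ===== PRECONDITION & SPEC =====
def Spec_extract_fields_py (row : List (String × String)) (out : List (String × String)) : Prop := out = extract_fields_py_alt row
instance (row : List (String × String)) (out : List (String × String)) : Decidable (Spec_extract_fields_py row out) := by unfold Spec_extract_fields_py; infer_instance

-- ===== CLAIM (what is proved, stated in full; the proofs are below) =====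
def Claim_equal_extract_fields_py : Prop := ∀ (row : List (String × String)), Dom_extract_fields_py row → Spec_extract_fields_py row (extract_fields_py row)

-- ===== LEMMAS AND PROOFS =====

-- first-match lookup on a raw association list (proof-side view of Dict.get?)
def pvLk : List (String × String) → String → Option String
  | [], _ => none
  | (k, v) :: t, c => if k = c then some v else pvLk t c

-- first present-and-truthy candidate, together with its index in the candidate list
def pvPickP (l : List (String × String)) : List String → Option (Int × String)
  | [] => none
  | c :: cs =>
    match pvLk l c with
    | some v => if v = "" then (pvPickP l cs).map (fun p => (p.1 + 1, p.2)) else some (0, v)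
    | none => (pvPickP l cs).map (fun p => (p.1 + 1, p.2))

-- the surviving (normalized key, value) pairs of B's reverse scan, in processing order
def pvSurv : List (String × String) → PySem.Set String → List (String × String)
  | [], _ => []
  | (k, v) :: t, seen =>
    let n := PySem.Str.lower (PySem.Str.strip k)
    if seen.contains n then pvSurv t seen else (n, v) :: pvSurv t (seen.add n)

-- B's loop body once the seen-filter has fired
def pvHit (best : PySem.Dict String (Int × String)) (kv : String × String) : PySem.Dict String (Int × String) :=
  if kv.2 = "" then best
  else
    match pvPRIORITY.get? kv.1 with
    | none => best
    | some (f, r) =>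
      match best.get? f with
      | none => best.insert f (r, kv.2)
      | some (j, _) => if r < j then best.insert f (r, kv.2) else best

lemma pv_contains_add (s : PySem.Set String) (n c : String) :
    (s.add n).contains c = true ↔ c = n ∨ s.contains c = true := by
  simp only [PySem.Set.add, PySem.Set.contains]
  split_ifs with h
  · constructor
    · intro hc; exact Or.inr hc
    · rintro (rfl | hc)
      · exact h
      · exact hc
  · simp [or_comm]

lemma pv_bstep_skip (seen : PySem.Set String) (best : PySem.Dict String (Int × String))
    (k v : String) (h : seen.contains (PySem.Str.lower (PySem.Str.strip k)) = true) :
    pvBStep (seen, best) (k, v) = (seen, best) := by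
  unfold pvBStep
  dsimp only
  rw [if_pos h]

lemma pv_bstep_go (seen : PySem.Set String) (best : PySem.Dict String (Int × String))
    (k v : String) (h : ¬ seen.contains (PySem.Str.lower (PySem.Str.strip k)) = true) :
    pvBStep (seen, best) (k, v)
      = (seen.add (PySem.Str.lower (PySem.Str.strip k)),
         pvHit best (PySem.Str.lower (PySem.Str.strip k), v)) := by
  unfold pvBStep pvHit
  dsimp only
  rw [if_neg h]
  by_cases hv : v = ""
  · rw [if_pos hv, if_pos hv]
  · rw [if_neg hv, if_neg hv]
    cases hr : pvPRIORITY.get? (PySem.Str.lower (PySem.Str.strip k)) with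
    | none => rfl
    | some p =>
      obtain ⟨f, r⟩ := p
      dsimp only
      cases best.get? f with
      | none => rfl
      | some q =>
        obtain ⟨j, w⟩ := q
        dsimp only
        by_cases hr2 : r < j
        · rw [if_pos hr2, if_pos hr2]
        · rw [if_neg hr2, if_neg hr2]

lemma pv_scan_eq (l : List (String × String)) :
    ∀ (seen : PySem.Set String) (best : PySem.Dict String (Int × String)),
      (l.foldl pvBStep (seen, best)).2 = (pvSurv l seen).foldl pvHit best := by
  induction l with
  | nil => intro seen best; rfl
  | cons kv t ih =>
    obtain ⟨k, v⟩ := kv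
    intro seen best
    simp only [pvSurv, List.foldl_cons]
    by_cases h : seen.contains (PySem.Str.lower (PySem.Str.strip k))
    · rw [pv_bstep_skip seen best k v h, if_pos h]
      exact ih seen best
    · rw [pv_bstep_go seen best k v h, if_neg h, List.foldl_cons]
      exact ih _ _

lemma pv_surv_keys (l : List (String × String)) :
    ∀ (seen : PySem.Set String) (c : String),
      c ∈ (pvSurv l seen).map Prod.fst → seen.contains c = false := by
  induction l with
  | nil => intro seen c h; simp [pvSurv] at h
  | cons kv t ih =>
    obtain ⟨k, v⟩ := kv
    intro seen c h
    simp only [pvSurv] at h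
    by_cases hn : seen.contains (PySem.Str.lower (PySem.Str.strip k))
    · rw [if_pos hn] at h; exact ih seen c h
    · rw [if_neg hn] at h
      simp only [List.map_cons, List.mem_cons] at h
      rcases h with rfl | h
      · exact Bool.not_eq_true _ ▸ (by simpa using hn)
      · have := ih _ c h
        by_cases hc : seen.contains c = true
        · have : (seen.add (PySem.Str.lower (PySem.Str.strip k))).contains c = true :=
            (pv_contains_add _ _ _).mpr (Or.inr hc)
          rw [ih _ c h] at this; exact absurd this (by simp)
        · simpa using hc

lemma pv_surv_nodup (l : List (String × String)) :
    ∀ (seen : PySem.Set String), ((pvSurv l seen).map Prod.fst).Nodup := by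
  induction l with
  | nil => intro seen; simp [pvSurv]
  | cons kv t ih =>
    obtain ⟨k, v⟩ := kv
    intro seen
    simp only [pvSurv]
    by_cases hn : seen.contains (PySem.Str.lower (PySem.Str.strip k))
    · rw [if_pos hn]; exact ih seen
    · rw [if_neg hn]
      simp only [List.map_cons, List.nodup_cons]
      refine ⟨fun hmem => ?_, ih _⟩
      have hfalse := pv_surv_keys t _ _ hmem
      have htrue : (seen.add (PySem.Str.lower (PySem.Str.strip k))).contains
          (PySem.Str.lower (PySem.Str.strip k)) = true :=
        (pv_contains_add _ _ _).mpr (Or.inl rfl)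
      rw [hfalse] at htrue; exact absurd htrue (by simp)

lemma pv_lk_surv (l : List (String × String)) :
    ∀ (seen : PySem.Set String) (c : String), seen.contains c = false →
      pvLk (pvSurv l seen) c
        = pvLk (l.map (fun kv => (PySem.Str.lower (PySem.Str.strip kv.1), kv.2))) c := by
  induction l with
  | nil => intro seen c _; rfl
  | cons kv t ih =>
    obtain ⟨k, v⟩ := kv
    intro seen c hc
    simp only [pvSurv, List.map_cons]
    by_cases hn : seen.contains (PySem.Str.lower (PySem.Str.strip k))
    · rw [if_pos hn]
      have hne : ¬ (PySem.Str.lower (PySem.Str.strip k)) = c := by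
        rintro rfl; rw [hc] at hn; exact absurd hn (by simp)
      simp only [pvLk, if_neg hne]
      exact ih seen c hc
    · rw [if_neg hn]
      simp only [pvLk]
      by_cases heq : (PySem.Str.lower (PySem.Str.strip k)) = c
      · simp [heq]
      · rw [if_neg heq, if_neg heq]
        refine ih _ c ?_
        by_cases hadd : (seen.add (PySem.Str.lower (PySem.Str.strip k))).contains c = true
        · rcases (pv_contains_add _ _ _).mp hadd with rfl | h
          · exact absurd rfl heq
          · rw [hc] at h; exact absurd h (by simp)
        · simpa using hadd

lemma pv_get?_eq_lk (d : PySem.Dict String String) (c : String) : d.get? c = pvLk d.items c := by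
  obtain ⟨l⟩ := d
  induction l with
  | nil => rfl
  | cons h t ih =>
    obtain ⟨k, v⟩ := h
    rw [PySem.Dict.get?_mk_cons]
    simp only [pvLk, beq_iff_eq]
    split_ifs with hkc
    · rfl
    · exact ih

lemma pv_get?_normalize (row : List (String × String)) (c : String) :
    (pvNormalize row).get? c
      = pvLk (row.reverse.map (fun kv => (PySem.Str.lower (PySem.Str.strip kv.1), kv.2))) c := by
  induction row using List.reverseRecOn with
  | nil => rfl
  | append_singleton t x ih =>
    obtain ⟨k, v⟩ := x
    simp only [pvNormalize, List.foldl_append, List.foldl_cons, List.foldl_nil,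
      List.reverse_append, List.reverse_cons, List.reverse_nil, List.nil_append,
      List.cons_append, List.map_cons] at *
    rw [PySem.Dict.get?_insert]
    simp only [pvLk]
    by_cases h : PySem.Str.lower (PySem.Str.strip k) = c
    · simp [h]
    · rw [if_neg h, if_neg (fun hc => h hc.symm), ih]

lemma pv_pickP_congr (l l' : List (String × String)) (cs : List String)
    (h : ∀ c ∈ cs, pvLk l c = pvLk l' c) : pvPickP l cs = pvPickP l' cs := by
  induction cs with
  | nil => rfl
  | cons c cs ih =>
    simp only [pvPickP, h c List.mem_cons_self,
      ih (fun x hx => h x (List.mem_cons_of_mem _ hx))]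

lemma pvPick_eq_pickP (d : PySem.Dict String String) (cs : List String) :
    pvPick d cs = (match pvPickP d.items cs with | some p => p.2 | none => "") := by
  induction cs with
  | nil => rfl
  | cons c cs ih =>
    simp only [pvPick, pvPickP, pv_get?_eq_lk]
    cases hlc : pvLk d.items c with
    | some v =>
      by_cases hv : v = ""
      · simp only [hv, ne_eq, not_true_eq_false, if_false, if_true, ih]
        cases pvPickP d.items cs <;> rfl
      · simp [hv]
    | none =>
      simp only [ih]
      cases pvPickP d.items cs <;> rfl

lemma pvLk_append (l : List (String × String)) (k v c : String) :
    pvLk (l ++ [(k, v)]) c = (match pvLk l c with | some w => some w | none => if k = c then some v else none) := by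
  induction l with
  | nil => rfl
  | cons p t ih =>
    obtain ⟨a, b⟩ := p
    simp only [List.cons_append, pvLk]
    by_cases hac : a = c
    · simp [hac]
    · simp only [if_neg hac]; exact ih

lemma pvLk_eq_none_of_not_mem (l : List (String × String)) (k : String) (h : k ∉ l.map Prod.fst) : pvLk l k = none := by
  induction l with
  | nil => rfl
  | cons p t ih =>
    obtain ⟨a, b⟩ := p
    simp only [List.map_cons, List.mem_cons, not_or] at h
    simp only [pvLk]
    rw [if_neg (fun hc => h.1 hc.symm), ih h.2]

lemma pvPickP_nil (cs : List String) : pvPickP [] cs = none := by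
  induction cs with
  | nil => rfl
  | cons c cs ih => simp only [pvPickP, pvLk, ih]; rfl

lemma pvPickP_append_miss (l : List (String × String)) (k v : String) (cs : List String)
    (h : k ∉ cs ∨ v = "") :
    pvPickP (l ++ [(k, v)]) cs = pvPickP l cs := by
  induction cs with
  | nil => rfl
  | cons c cs ih =>
    have h' : k ∉ cs ∨ v = "" := by
      rcases h with h | h
      · exact Or.inl fun hm => h (List.mem_cons_of_mem _ hm)
      · exact Or.inr h
    simp only [pvPickP, pvLk_append]
    cases hlc : pvLk l c with
    | some w =>
      by_cases hw : w = "" <;> simp [hw, ih h']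
    | none =>
      by_cases hkc : k = c
      · subst hkc
        have hv : v = "" := by
          rcases h with h | h
          · exact absurd List.mem_cons_self h
          · exact h
        subst hv
        simp [ih h']
      · simp [hkc, ih h']

lemma pvPickP_nonneg (l : List (String × String)) (cs : List String) (i : Int) (w : String)
    (h : pvPickP l cs = some (i, w)) : 0 ≤ i := by
  induction cs generalizing i w with
  | nil => simp [pvPickP] at h
  | cons c cs ih =>
    simp only [pvPickP] at h
    cases hlc : pvLk l c with
    | some v =>
      simp only [hlc] at h
      by_cases hv : v = ""
      · rw [if_pos hv] at h
        cases hp : pvPickP l cs with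
        | none => rw [hp] at h; simp at h
        | some p =>
          rw [hp] at h
          obtain ⟨j, w'⟩ := p
          simp at h
          have hj : 0 ≤ j := ih j w' hp
          omega
      · rw [if_neg hv] at h
        simp at h
        omega
    | none =>
      simp only [hlc] at h
      cases hp : pvPickP l cs with
      | none => rw [hp] at h; simp at h
      | some p =>
        rw [hp] at h
        obtain ⟨j, w'⟩ := p
        simp at h
        have hj : 0 ≤ j := ih j w' hp
        omega

lemma pvPickP_append_hit (l : List (String × String)) (k v : String) (cs : List String)
    (hk : pvLk l k = none) (hnd : cs.Nodup) (hmem : k ∈ cs) (hv : v ≠ "") :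
    pvPickP (l ++ [(k, v)]) cs =
      (match pvPickP l cs with
       | none => some ((cs.idxOf k : Int), v)
       | some (i, w) => if (cs.idxOf k : Int) < i then some ((cs.idxOf k : Int), v) else some (i, w)) := by
  induction cs with
  | nil => exact absurd hmem (List.not_mem_nil)
  | cons c cs ih =>
    by_cases hkc : c = k
    · subst hkc
      have hlc : pvLk l c = none := hk
      simp only [pvPickP, pvLk_append, hlc, if_true, List.idxOf_cons_self]
      rw [if_neg hv]
      cases hp : pvPickP l cs with
      | none => simp
      | some p =>
        obtain ⟨i, w⟩ := p
        simp only [Option.map_some]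
        have hnn : 0 ≤ i := pvPickP_nonneg l cs i w hp
        have : (0 : Int) < i + 1 := by omega
        simp [this]
    · have hmem' : k ∈ cs := by
        rcases List.mem_cons.mp hmem with h | h
        · exact absurd h.symm hkc
        · exact h
      have hidx : (c :: cs).idxOf k = cs.idxOf k + 1 := by
        simp [hkc]
      simp only [pvPickP, pvLk_append, hidx]
      cases hlc : pvLk l c with
      | some w =>
        by_cases hw : w = ""
        · subst hw
          simp only [ih hnd.of_cons hmem']
          cases hp : pvPickP l cs with
          | none => simp
          | some p =>
            obtain ⟨i, w'⟩ := p
            have hiff : ((cs.idxOf k : Int) < i) ↔ ((cs.idxOf k : Int) + 1 < i + 1) := by omega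
            by_cases hlt : (cs.idxOf k : Int) < i
            · simp [hlt, hiff.mp hlt]
            · simp [hlt]
        · simp [hw]
          intro hcast
          omega
      | none =>
        have hkc' : ¬ k = c := fun h => hkc h.symm
        simp only [if_neg hkc', ih hnd.of_cons hmem']
        cases hp : pvPickP l cs with
        | none => simp
        | some p =>
          obtain ⟨i, w'⟩ := p
          have hiff : ((cs.idxOf k : Int) < i) ↔ ((cs.idxOf k : Int) + 1 < i + 1) := by omega
          by_cases hlt : (cs.idxOf k : Int) < i
          · simp [hlt, hiff.mp hlt]
          · simp [hlt]

-- concrete facts about the literal tables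
set_option maxRecDepth 100000 in
lemma pv_cands_to_rev : ∀ q ∈ pvCANDS, ∀ c ∈ q.2, pvPRIORITY.get? c = some (q.1, (q.2.idxOf c : Int)) := by decide
set_option maxRecDepth 100000 in
lemma pv_rev_to_cands : ∀ p ∈ pvPRIORITY.items, ∃ q ∈ pvCANDS, q.1 = p.2.1 ∧ p.1 ∈ q.2 ∧ ((q.2.idxOf p.1 : Int)) = p.2.2 := by decide
lemma pv_cands_nodup : ∀ q ∈ pvCANDS, q.2.Nodup := by decide
lemma pv_cands_fun : ∀ q ∈ pvCANDS, ∀ q' ∈ pvCANDS, q.1 = q'.1 → q.2 = q'.2 := by decide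
lemma pv_fields_eq : pvFIELDS = pvCANDS.map Prod.fst := by decide
lemma pv_cands_keys_nodup : (pvCANDS.map Prod.fst).Nodup := by decide

lemma pv_best_inv (l : List (String × String)) (hn : (l.map Prod.fst).Nodup) :
    ∀ f cs, (f, cs) ∈ pvCANDS → (l.foldl pvHit PySem.Dict.empty).get? f = pvPickP l cs := by
  induction l using List.reverseRecOn with
  | nil =>
    intro f cs _
    simp [pvPickP_nil, PySem.Dict.get?_empty]
  | append_singleton l kv ih =>
    obtain ⟨k, v⟩ := kv
    intro f cs hf
    rw [List.map_append, List.nodup_append] at hn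
    have hn' : (l.map Prod.fst).Nodup := hn.1
    have hk : k ∉ l.map Prod.fst := fun hm =>
      hn.2.2 k hm k (by simp) rfl
    have hlk : pvLk l k = none := pvLk_eq_none_of_not_mem l k hk
    rw [List.foldl_append, List.foldl_cons, List.foldl_nil]
    set b := l.foldl pvHit PySem.Dict.empty with hb0
    unfold pvHit
    by_cases hv : v = ""
    · rw [if_pos hv, pvPickP_append_miss l k v cs (Or.inr hv)]
      exact ih hn' f cs hf
    · rw [if_neg hv]
      cases hr : pvPRIORITY.get? k with
      | none =>
        have hknot : k ∉ cs := fun hm => by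
          have h2 := pv_cands_to_rev (f, cs) hf k hm
          rw [hr] at h2
          simp at h2
        dsimp only
        rw [pvPickP_append_miss l k v cs (Or.inl hknot)]
        exact ih hn' f cs hf
      | some p =>
        obtain ⟨f0, i0⟩ := p
        have hmemR : (k, (f0, i0)) ∈ pvPRIORITY.items := PySem.Dict.mem_items_of_get?_eq_some _ hr
        obtain ⟨q, hq, hq1, hq2, hq3⟩ := pv_rev_to_cands _ hmemR
        obtain ⟨qf, qcs⟩ := q
        simp only at hq1 hq2 hq3
        subst hq1
        dsimp only
        by_cases hff : f = qf
        · subst hff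
          have hcs : cs = qcs := pv_cands_fun (f, cs) hf (f, qcs) hq rfl
          subst hcs
          rw [pvPickP_append_hit l k v cs hlk (pv_cands_nodup (f, cs) hf) hq2 hv, hq3]
          have hbp := ih hn' f cs hf
          rw [← hbp]
          cases hb : b.get? f with
          | none => dsimp only; simp [PySem.Dict.get?_insert_self]
          | some p =>
            obtain ⟨j, w⟩ := p
            dsimp only
            by_cases hlt : i0 < j
            · simp [hlt, PySem.Dict.get?_insert_self]
            · simp [hlt, hb]
        · have hknot : k ∉ cs := fun hm => by
            have h2 := pv_cands_to_rev (f, cs) hf k hm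
            rw [hr] at h2
            simp only [Option.some.injEq, Prod.mk.injEq] at h2
            exact hff h2.1.symm
          rw [pvPickP_append_miss l k v cs (Or.inl hknot), ← ih hn' f cs hf]
          cases hb : b.get? qf with
          | none => dsimp only; rw [PySem.Dict.get?_insert_of_ne b (i0, v) hff]
          | some p =>
            obtain ⟨j, w⟩ := p
            dsimp only
            by_cases hlt : i0 < j
            · simp [hlt, PySem.Dict.get?_insert_of_ne b (i0, v) hff]
            · simp [hlt]

-- per-field agreement: A's pick equals the value B's scan records
lemma pv_field_agree (row : List (String × String)) (f : String) (cs : List String)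
    (hf : (f, cs) ∈ pvCANDS) :
    pvPick (pvNormalize row) cs
      = (match (row.reverse.foldl pvBStep (PySem.Set.empty, PySem.Dict.empty)).2.get? f with
         | some p => p.2 | none => "") := by
  rw [pv_scan_eq, pv_best_inv _ (pv_surv_nodup row.reverse PySem.Set.empty) f cs hf]
  rw [pvPick_eq_pickP]
  have hlk : ∀ c ∈ cs, pvLk (pvNormalize row).items c = pvLk (pvSurv row.reverse PySem.Set.empty) c := by
    intro c _
    rw [← pv_get?_eq_lk, pv_get?_normalize, pv_lk_surv row.reverse PySem.Set.empty c rfl]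
  rw [pv_pickP_congr _ _ cs hlk]

-- ===== VERDICT (by name: the statement is the Claim_ definition above) =====
theorem extract_fields_py_spec : Claim_equal_extract_fields_py := by
  intro row _
  unfold Spec_extract_fields_py extract_fields_py extract_fields_py_alt
  dsimp only
  rw [PySem.Dict.items_foldl_insert_fresh pvCANDS Prod.fst
      (fun p => pvPick (pvNormalize row) p.2) PySem.Dict.empty
      (fun _ _ => rfl) pv_cands_keys_nodup]
  rw [show (PySem.Dict.empty : PySem.Dict String String).items = [] from rfl, List.nil_append, pv_fields_eq, List.map_map]
  refine List.map_congr_left ?_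
  intro p hp
  obtain ⟨f, cs⟩ := p
  simp only [Function.comp]
  exact congrArg (fun x => (f, x)) (pv_field_agree row f cs hp)
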